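-- pv_equiv track=rewrite | github.com/wangbiu/lpmln_isets | lpmln/iset/IndependentSet.py | generate_prefix_op_string
-- ===== SOURCE A (Python) =====
-- def generate_prefix_op_string(sets, op):
--     if len(sets) == 0:
--         return ""
--
--     if len(sets) == 1:
--         return sets[0]
--
--     set_str = sets[0]
--     for i in range(1, len(sets)):
--         set_str = "%s(%s, %s)" % (op, set_str, sets[i])
--
--     return set_str
-- ===== SOURCE B (Python) =====
-- def generate_prefix_op_string(sets, op):
--     if len(sets) == 0:
--         return ""
--     if len(sets) == 1:
--         return sets[0]
--     # closed-form shape of the left-nested expression: all opening tokens first,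
--     # then the first element, then ", <elem>)" for each remaining element
--     return (op + "(") * (len(sets) - 1) + sets[0] + "".join(", " + s + ")" for s in sets[1:])
-- ===== Notes on version B (the rewrite author's own statement) =====
-- stated objective: faster
-- what changed: Replaces the iterative re-wrapping of an accumulator (each step copies the whole string so far) with a flat closed-form construction: n-1 opening 'op(' tokens, the first element, then a joined ', elem)' suffix per remaining element.
import Mathlib
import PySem

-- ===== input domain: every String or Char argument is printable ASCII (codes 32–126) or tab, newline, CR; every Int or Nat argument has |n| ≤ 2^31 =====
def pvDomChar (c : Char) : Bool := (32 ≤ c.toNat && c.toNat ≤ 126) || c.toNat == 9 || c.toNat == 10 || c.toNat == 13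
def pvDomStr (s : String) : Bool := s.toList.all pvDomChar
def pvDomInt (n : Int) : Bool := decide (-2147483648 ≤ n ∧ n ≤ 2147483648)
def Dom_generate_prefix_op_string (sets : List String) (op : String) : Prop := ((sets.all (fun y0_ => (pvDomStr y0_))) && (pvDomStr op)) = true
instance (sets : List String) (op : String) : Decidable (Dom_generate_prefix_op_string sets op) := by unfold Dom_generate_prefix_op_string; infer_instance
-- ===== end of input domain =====

-- B replaces A's iterative re-wrapping of an accumulator by a flat closed-form
-- construction ((n-1) opening tokens, first element, joined ", elem)" suffixes); timing run: measurably faster (A rebuilds the whole string each step).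


-- ===== PORT A =====
-- literal transliteration: two length guards, then a fold over range(1, len(sets))
-- re-wrapping the accumulator ("%s(%s, %s)" % (op, set_str, sets[i])); indices are
-- always in range, so pyGetD's default is never used
def generate_prefix_op_string (sets : List String) (op : String) : String :=
  if sets.length = 0 then ""
  else if sets.length = 1 then PySem.List.pyGetD sets 0 ""
  else
    let set_str := PySem.List.pyGetD sets 0 ""
    (PySem.List.pyRange 1 (sets.length : Int) 1).foldl
      (fun set_str i => op ++ "(" ++ set_str ++ ", " ++ PySem.List.pyGetD sets i "" ++ ")")
      set_str

-- ===== PORT B =====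
-- literal transliteration of Source B: (op+"(")*(n-1) is the join of n-1 copies,
-- "".join(", " + s + ")" for s in sets[1:]) is the join of the mapped tail
def generate_prefix_op_string_alt (sets : List String) (op : String) : String :=
  match sets with
  | [] => ""
  | [s] => s
  | s0 :: rest =>
      String.join (List.replicate ((s0 :: rest).length - 1) (op ++ "(")) ++ s0 ++
      String.join (rest.map (fun s => ", " ++ s ++ ")"))

-- ===== PRECONDITION & SPEC =====
def Spec_generate_prefix_op_string (sets : List String) (op : String) (out : String) : Prop := out = generate_prefix_op_string_alt sets op
instance (sets : List String) (op : String) (out : String) : Decidable (Spec_generate_prefix_op_string sets op out) := by unfold Spec_generate_prefix_op_string; infer_instance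

-- ===== CLAIM (what is proved, stated in full; the proofs are below) =====
def Claim_equal_generate_prefix_op_string : Prop := ∀ (sets : List String) (op : String), Dom_generate_prefix_op_string sets op → Spec_generate_prefix_op_string sets op (generate_prefix_op_string sets op)

-- ===== LEMMAS AND PROOFS =====

theorem foldl_append_str (l : List String) (a : String) :
    l.foldl (fun r s => r ++ s) a = a ++ String.join l := by
  induction l generalizing a with
  | nil => simp [String.join]
  | cons h t ih =>
      have hj : String.join (h :: t) = h ++ String.join t := by
        rw [String.join, List.foldl_cons]
        simpa using ih h
      rw [List.foldl_cons, ih, hj, String.append_assoc]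

theorem join_append_str (l1 l2 : List String) :
    String.join (l1 ++ l2) = String.join l1 ++ String.join l2 := by
  rw [String.join, List.foldl_append, foldl_append_str]
  simpa using foldl_append_str l1 ""

-- the left-nested fold has the flat closed-form shape B builds
theorem wrap_foldl_closed_form (op : String) (rest : List String) (acc : String) :
    rest.foldl (fun a s => op ++ "(" ++ a ++ ", " ++ s ++ ")") acc
      = String.join (List.replicate rest.length (op ++ "(")) ++ acc ++
        String.join (rest.map (fun s => ", " ++ s ++ ")")) := by
  induction rest generalizing acc with
  | nil => simp [String.join]
  | cons s t ih =>
      rw [List.foldl_cons, ih]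
      have hj : String.join ((", " ++ s ++ ")") :: t.map (fun x => ", " ++ x ++ ")"))
          = (", " ++ s ++ ")") ++ String.join (t.map (fun x => ", " ++ x ++ ")")) := by
        rw [String.join, List.foldl_cons]
        simpa using foldl_append_str (t.map (fun x => ", " ++ x ++ ")")) (", " ++ s ++ ")")
      simp only [List.length_cons, List.map_cons, hj, List.replicate_succ', join_append_str]
      simp [String.join, String.append_assoc]

-- ===== VERDICT (by name: the statement is the Claim_ definition above) =====
theorem generate_prefix_op_string_spec : Claim_equal_generate_prefix_op_string := by
  intro sets op _
  show generate_prefix_op_string sets op = generate_prefix_op_string_alt sets op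
  match sets with
  | [] => rfl
  | [s] =>
      simp [generate_prefix_op_string, generate_prefix_op_string_alt,
        PySem.List.pyGetD]
  | s0 :: s1 :: t =>
      rw [generate_prefix_op_string, generate_prefix_op_string_alt]
      rw [if_neg (show ¬ (s0 :: s1 :: t).length = 0 by simp),
          if_neg (show ¬ (s0 :: s1 :: t).length = 1 by simp)]
      rw [PySem.List.foldl_pyRange_pyGetD' (s0 :: s1 :: t) ""
            (fun a s => op ++ "(" ++ a ++ ", " ++ s ++ ")")
            (PySem.List.pyGetD (s0 :: s1 :: t) 0 "") (a := 1) (by omega)]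
      rw [PySem.List.pyGetD_zero_cons]
      rw [show ((s0 :: s1 :: t).drop (1 : Int).toNat) = s1 :: t from rfl,
          wrap_foldl_closed_form]
      simp [String.append_assoc]
      simp
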